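-- pv_equiv track=rewrite | github.com/CodedBinary/MusicScraper | newproject/scrapbase.py | arrayinstring
-- ===== SOURCE A (Python) =====
-- def arrayinstring(array,string):
--     '''Returns a score based on whether the elements of an array occur in a string
--
--     Desc: If all elements of an array are in a substring of string, it returns 1
--     If all elements of an array are not in a substring of string, it returns -1
--     If its mixed results, it returns a 0
--
--     Args:
--         array   (list)  : An array of strings that should be looked for in string
--         string  (str)   : A string to be searched through
--
--     Results:
--         score   (int)   : A score determining whether the elements of an array were all in or not a substring
--     '''
--     score=0
--     for requirements in array:
--         if requirements in string:
--             score+=1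
--         else:
--             score-=1
--     if score == len(array):
--         score = 1
--     elif score == -len(array):
--         score = -1
--     else:
--         score = 0
--     return score
-- ===== SOURCE B (Python) =====
-- def arrayinstring(array, string):
--     '''Returns a score based on whether the elements of an array occur in a string'''
--     if all(x in string for x in array):
--         return 1
--     if not any(x in string for x in array):
--         return -1
--     return 0
-- ===== Notes on version B (the rewrite author's own statement) =====
-- stated objective: faster
-- what changed: Replaced the running +1/-1 score counter (which always scans the whole array) with two short-circuiting quantifier checks, all() for the all-present case and not any() for the none-present case, which stop at the first counterexample.
import Mathlib
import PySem

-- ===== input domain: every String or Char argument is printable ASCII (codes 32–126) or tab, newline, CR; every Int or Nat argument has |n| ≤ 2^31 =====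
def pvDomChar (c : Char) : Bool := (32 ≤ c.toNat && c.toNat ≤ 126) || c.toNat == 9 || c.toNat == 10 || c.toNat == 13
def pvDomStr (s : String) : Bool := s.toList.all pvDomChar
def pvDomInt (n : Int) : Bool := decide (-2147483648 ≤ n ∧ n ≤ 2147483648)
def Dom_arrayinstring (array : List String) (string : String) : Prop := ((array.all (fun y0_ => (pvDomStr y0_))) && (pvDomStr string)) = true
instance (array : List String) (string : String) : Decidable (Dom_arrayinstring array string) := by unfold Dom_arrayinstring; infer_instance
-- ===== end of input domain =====

-- B replaces A's running +1/-1 counter with two short-circuiting quantifier checks (all / not any); measured faster on the generated inputs.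
-- ===== PORT A =====
def arrayinstring (array : List String) (string : String) : Int :=
  let score : Int := array.foldl
    (fun score requirements =>
      if PySem.Str.isIn requirements string then score + 1 else score - 1) 0
  if score = (array.length : Int) then 1
  else if score = -(array.length : Int) then -1
  else 0

-- ===== PORT B =====
def arrayinstring_alt (array : List String) (string : String) : Int :=
  if array.all (fun x => PySem.Str.isIn x string) then 1
  else if !(array.any (fun x => PySem.Str.isIn x string)) then -1
  else 0

-- ===== PRECONDITION & SPEC =====
def Spec_arrayinstring (array : List String) (string : String) (out : Int) : Prop := out = arrayinstring_alt array string
instance (array : List String) (string : String) (out : Int) : Decidable (Spec_arrayinstring array string out) := by unfold Spec_arrayinstring; infer_instance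

-- ===== CLAIM (what is proved, stated in full; the proofs are below) =====
def Claim_equal_arrayinstring : Prop := ∀ (array : List String) (string : String), Dom_arrayinstring array string → Spec_arrayinstring array string (arrayinstring array string)

-- ===== LEMMAS AND PROOFS =====

-- ===== VERDICT (by name: the statement is the Claim_ definition above) =====
theorem fold_score (string : String) (l : List String) (s : Int) :
    l.foldl (fun score requirements =>
      if PySem.Str.isIn requirements string then score + 1 else score - 1) s
      = s + 2 * (l.countP (fun x => PySem.Str.isIn x string) : Int) - l.length := by
  induction l generalizing s with
  | nil => simp
  | cons a t ih =>
    rw [List.foldl_cons, ih, List.countP_cons, List.length_cons]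
    by_cases h : PySem.Str.isIn a string = true
    · simp only [h, if_pos]; push_cast; ring
    · simp only [h, if_neg]; push_cast; ring

theorem arrayinstring_spec : Claim_equal_arrayinstring := by
  intro array string _
  unfold Spec_arrayinstring arrayinstring arrayinstring_alt
  simp only [fold_score, zero_add]
  set f := fun x => PySem.Str.isIn x string with hf
  have hle : array.countP f ≤ array.length := List.countP_le_length
  by_cases hall : array.all f = true
  · have : array.countP f = array.length := by
      rw [List.countP_eq_length]; intro a ha; exact (List.all_eq_true.mp hall) a ha
    rw [this]
    have : (2 * (array.length : Int) - array.length) = array.length := by omega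
    simp [hall, this]
  · have hlt : array.countP f < array.length := by
      rcases Nat.lt_or_ge (array.countP f) array.length with h | h
      · exact h
      · exfalso; apply hall
        have := Nat.le_antisymm hle h
        rw [List.all_eq_true]
        exact fun a ha => List.countP_eq_length.mp this a ha
    have hne : (2 * (array.countP f : Int) - array.length) ≠ array.length := by omega
    by_cases hany : array.any f = true
    · obtain ⟨a, ha, hfa⟩ := List.any_eq_true.mp hany
      have hpos : 0 < array.countP f := List.countP_pos_iff.mpr ⟨a, ha, hfa⟩
      have : (2 * (array.countP f : Int) - array.length) ≠ -(array.length : Int) := by omega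
      simp [hall, hany, hne, this]
    · have hz : array.countP f = 0 := by
        rw [List.countP_eq_zero]
        intro a ha hfa
        exact hany (List.any_eq_true.mpr ⟨a, ha, hfa⟩)
      have hnil : array ≠ [] := by
        intro h; exact hall (by simp [h])
      have hlen : 0 < array.length := List.length_pos_iff.mpr hnil
      simp only [hz, Nat.cast_zero, mul_zero, zero_sub]
      have h1 : -(array.length : Int) ≠ (array.length : Int) := by omega
      simp [hall, hany, h1]
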